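-- pv_equiv track=rewrite | github.com/nitishraghunathan/LeetcodeProblems | 1442-number-of-operations-to-make-network-connected/number-of-operations-to-make-network-connected.py | makeConnected
-- ===== SOURCE A (Python) =====
-- from typing import List
--
-- class UnionFind:
--     def __init__(self, n):
--         self.root = [i for i in range(n)]
--         self.rank = [1]*n
--         self.extra = 0
--     def find(self, x):
--         if x == self.root[x]:
--             return x
--         self.root[x] = self.find(self.root[x])
--         return self.root[x]
--
--     def union(self, x, y):
--         rootx = self.find(x)
--         rooty = self.find(y)
--         if rooty != rootx:
--             if self.rank[rootx] >= self.rank[rooty]: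
--                 self.root[rooty] = rootx
--             elif self.rank[rooty] > self.rank[rootx]:
--                 self.root[rootx] = rooty
--             else:
--                 self.root[rooty] = rootx
--                 self.rank[rootx] +=1
--
--     def is_connected(self, x, y):
--         return self.find(x) == self.find(y)
--
-- def makeConnected(n: int, connections: List[List[int]]) -> int:
--     if len(connections) < n-1:
--         return -1
--     uf = UnionFind(n)
--     for connection in connections:
--         if not uf.is_connected(connection[0], connection[1]):
--             uf.union(connection[0], connection[1])
--             n-=1
--     return n-1
-- ===== SOURCE B (Python) =====
-- from typing import List
--
-- def makeConnected(n: int, connections: List[List[int]]) -> int: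
--     if len(connections) < n - 1:
--         return -1
--     comp = list(range(n))
--     count = n
--     for conn in connections:
--         cu = comp[conn[0]]
--         cv = comp[conn[1]]
--         if cu != cv:
--             comp = [cu if c == cv else c for c in comp]
--             count -= 1
--     return count - 1
-- ===== Notes on version B (the rewrite author's own statement) =====
-- stated objective: alternative
-- what changed: Replaces A's union-find forest (recursive find with path compression and union by rank) by a flat component-label array that is wholly relabelled whenever an edge joins two distinct labels.
import Mathlib
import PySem

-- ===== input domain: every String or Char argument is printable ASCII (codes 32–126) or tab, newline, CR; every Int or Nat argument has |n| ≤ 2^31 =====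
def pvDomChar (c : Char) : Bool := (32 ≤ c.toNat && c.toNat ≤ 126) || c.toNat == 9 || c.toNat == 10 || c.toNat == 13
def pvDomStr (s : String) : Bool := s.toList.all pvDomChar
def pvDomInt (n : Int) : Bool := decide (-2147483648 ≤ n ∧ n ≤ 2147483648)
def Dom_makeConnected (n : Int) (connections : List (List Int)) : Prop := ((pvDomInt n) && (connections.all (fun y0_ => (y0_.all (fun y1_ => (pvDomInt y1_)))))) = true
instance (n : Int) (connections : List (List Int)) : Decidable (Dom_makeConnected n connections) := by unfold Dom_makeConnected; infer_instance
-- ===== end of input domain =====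

-- B replaces A's union-find forest (path compression + rank) by a flat component-label
-- array that is relabelled on each merge; same return value, no speed claim.

-- ===== PORT A =====
-- UnionFind.find, transliterated: reads go through the untouched list (Python reads each
-- root[x] before any mutation of that chain entry), path compression is applied on the way
-- back up.  The fuel argument only makes the recursion structurally terminating; every call
-- is made with fuel = len(root), enough for any state A can reach (proved below).
def pvFind (root : List Int) (x : Int) : Nat → List Int × Int
  | 0 => (root, x)                    -- fuel exhausted: unreachable in states A reaches
  | fuel + 1 =>
    match PySem.List.pyGet? root x with
    | none => (root, x)               -- Python raises IndexError here (outside Pre_)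
    | some rx =>
      if x = rx then (root, x)
      else
        let p := pvFind root rx fuel
        (PySem.List.pySetD p.1 x p.2, p.2)

-- one iteration of A's for-loop over (root, rank, n); is_connected and union inlined.
-- pyGetD stands for Python's raising indexing: under Pre_ every index is in range.
def pvStepA (st : List Int × List Int × Int) (conn : List Int) : List Int × List Int × Int :=
  let u := PySem.List.pyGetD conn 0 0
  let v := PySem.List.pyGetD conn 1 0
  let p1 := pvFind st.1 u st.1.length
  let p2 := pvFind p1.1 v p1.1.length
  if p1.2 = p2.2 then (p2.1, st.2.1, st.2.2)     -- is_connected: nothing happens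
  else
    -- union(u, v): find both again, then link by rank
    let p3 := pvFind p2.1 u p2.1.length
    let p4 := pvFind p3.1 v p3.1.length
    let rkx := PySem.List.pyGetD st.2.1 p3.2 0
    let rky := PySem.List.pyGetD st.2.1 p4.2 0
    if p4.2 ≠ p3.2 then
      if rkx ≥ rky then (PySem.List.pySetD p4.1 p4.2 p3.2, st.2.1, st.2.2 - 1)
      else if rky > rkx then (PySem.List.pySetD p4.1 p3.2 p4.2, st.2.1, st.2.2 - 1)
      else (PySem.List.pySetD p4.1 p4.2 p3.2, PySem.List.pySetD st.2.1 p3.2 (rkx + 1), st.2.2 - 1)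
    else (p4.1, st.2.1, st.2.2 - 1)

def makeConnected (n : Int) (connections : List (List Int)) : Int :=
  if (connections.length : Int) < n - 1 then -1
  else
    let root0 := (List.range n.toNat).map (fun (i : Nat) => (i : Int))
    let rank0 := List.replicate n.toNat (1 : Int)
    let st := connections.foldl pvStepA (root0, rank0, n)
    st.2.2 - 1

-- ===== PORT B =====
-- one iteration of B's loop over (comp, count)
def pvStepB (st : List Int × Int) (conn : List Int) : List Int × Int :=
  let cu := PySem.List.pyGetD st.1 (PySem.List.pyGetD conn 0 0) 0
  let cv := PySem.List.pyGetD st.1 (PySem.List.pyGetD conn 1 0) 0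
  if cu = cv then st
  else (st.1.map (fun c => if c = cv then cu else c), st.2 - 1)

def makeConnected_alt (n : Int) (connections : List (List Int)) : Int :=
  if (connections.length : Int) < n - 1 then -1
  else
    let st := connections.foldl pvStepB ((List.range n.toNat).map (fun (i : Nat) => (i : Int)), n)
    st.2 - 1

-- ===== PRECONDITION & SPEC =====
-- Pre_ excludes exactly the inputs on which Python A raises IndexError: past the length
-- guard, every connection must have at least two entries and both endpoints must be valid
-- (possibly negative) indices into a list of n nodes.
def Pre_makeConnected (n : Int) (connections : List (List Int)) : Prop :=
  ((connections.length : Int) < n - 1) ∨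
    ∀ c ∈ connections, 2 ≤ c.length ∧
      PySem.Raise.InRange n.toNat (c.getD 0 0) ∧ PySem.Raise.InRange n.toNat (c.getD 1 0)
instance (n : Int) (connections : List (List Int)) : Decidable (Pre_makeConnected n connections) := by
  unfold Pre_makeConnected; infer_instance
def pvWitness_makeConnected : Int × List (List Int) := (3, [[0, 1], [1, 2]])

def Spec_makeConnected (n : Int) (connections : List (List Int)) (out : Int) : Prop := out = makeConnected_alt n connections
instance (n : Int) (connections : List (List Int)) (out : Int) : Decidable (Spec_makeConnected n connections out) := by unfold Spec_makeConnected; infer_instance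

-- ===== CLAIM (what is proved, stated in full; the proofs are below) =====
def Claim_equal_makeConnected : Prop := ∀ (n : Int) (connections : List (List Int)), Dom_makeConnected n connections → Pre_makeConnected n connections → Spec_makeConnected n connections (makeConnected n connections)

-- ===== LEMMAS AND PROOFS =====

-- normalised index: Python's negative indices count from the end
def pvNrm (L : Nat) (i : Int) : Int := if i < 0 then i + L else i

-- parent pointer read (only used at non-negative, in-range indices)
def pvPf (root : List Int) (x : Int) : Int := root.getD x.toNat 0

-- the root of x's tree: iterate the parent map length-many times
def pvRootOf (root : List Int) (x : Int) : Int := (pvPf root)^[root.length] x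

-- well-formed forest: parents in range, and acyclic via a decreasing measure
def pvWF (root : List Int) : Prop :=
  (∀ x : Int, 0 ≤ x → x < root.length → 0 ≤ pvPf root x ∧ pvPf root x < root.length) ∧
  (∃ d : Int → Nat, ∀ x : Int, 0 ≤ x → x < root.length →
      pvPf root x = x ∨ d (pvPf root x) < d x)


-- ---- index bridges ---------------------------------------------------------

lemma pvNrm_range (L : Nat) (i : Int) (h : PySem.Raise.InRange L i) :
    0 ≤ pvNrm L i ∧ pvNrm L i < L := by
  obtain ⟨h1, h2⟩ := h; unfold pvNrm; constructor <;> split <;> omega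

lemma pv_getD_eq_getElem (xs : List Int) (i : Nat) (h : i < xs.length) :
    xs.getD i 0 = xs[i] := by
  simp [List.getD_eq_getElem?_getD, List.getElem?_eq_getElem h]

lemma pvPf_eq_getElem (root : List Int) (x : Int) (h0 : 0 ≤ x) (h : x < root.length) :
    pvPf root x = root[x.toNat]'(by omega) := by
  unfold pvPf; exact pv_getD_eq_getElem root x.toNat (by omega)

lemma pyGet?_pvPf (root : List Int) (x : Int) (h0 : 0 ≤ x) (h : x < root.length) :
    PySem.List.pyGet? root x = some (pvPf root x) := by
  have hx : x.toNat < root.length := by omega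
  rw [pvPf_eq_getElem root x h0 h]
  simp [PySem.List.pyGet?, PySem.List.pyIdx?, h0, h]

lemma pyGet?_nrm (root : List Int) (x : Int) (h : PySem.Raise.InRange root.length x) :
    PySem.List.pyGet? root x = some (pvPf root (pvNrm root.length x)) := by
  obtain ⟨h1, h2⟩ := h
  by_cases hneg : x < 0
  · have hk : root.length - (-x).toNat < root.length := by omega
    have he : (pvNrm root.length x).toNat = root.length - (-x).toNat := by
      unfold pvNrm; split <;> omega
    have hg : pvPf root (pvNrm root.length x) = root[root.length - (-x).toNat]'hk := by
      unfold pvPf; rw [he]; exact pv_getD_eq_getElem root _ hk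
    rw [hg]
    simp [PySem.List.pyGet?, PySem.List.pyIdx?, (show ¬ (0 ≤ x) by omega), h1,
      List.getElem?_eq_getElem hk]
  · have hx : x.toNat < root.length := by omega
    have he : (pvNrm root.length x).toNat = x.toNat := by unfold pvNrm; split <;> omega
    simp [PySem.List.pyGet?, PySem.List.pyIdx?, hneg, h1, h2, pvPf, he, not_lt.mp hneg,
      List.getElem?_eq_getElem hx, pv_getD_eq_getElem root _ hx]

lemma pyGetD_nrm (xs : List Int) (i : Int) (d : Int) (h : PySem.Raise.InRange xs.length i) :
    PySem.List.pyGetD xs i d = pvPf xs (pvNrm xs.length i) := by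
  unfold PySem.List.pyGetD
  rw [pyGet?_nrm xs i h]
  rfl

lemma pySetD_nrm (xs : List Int) (i : Int) (v : Int) (h : PySem.Raise.InRange xs.length i) :
    PySem.List.pySetD xs i v = xs.set (pvNrm xs.length i).toNat v := by
  obtain ⟨h1, h2⟩ := h
  by_cases hneg : i < 0
  · have he : (pvNrm xs.length i).toNat = xs.length - (-i).toNat := by
      unfold pvNrm; split <;> omega
    simp [PySem.List.pySetD, PySem.List.pySet?, PySem.List.pyIdx?,
      (show ¬ (0 ≤ i) by omega), h1, he]
  · have he : (pvNrm xs.length i).toNat = i.toNat := by unfold pvNrm; split <;> omega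
    simp [PySem.List.pySetD, PySem.List.pySet?, PySem.List.pyIdx?, hneg, h1, h2, he,
      not_lt.mp hneg]

lemma pvPf_set (root : List Int) (a v x : Int) (ha0 : 0 ≤ a) (ha : a < root.length)
    (hx0 : 0 ≤ x) :
    pvPf (root.set a.toNat v) x = if x = a then v else pvPf root x := by
  unfold pvPf
  by_cases hxa : x = a
  · subst hxa
    rw [if_pos rfl, pv_getD_eq_getElem _ _ (by rw [List.length_set]; omega),
      List.getElem_set_self (by rw [List.length_set]; omega)]
  · rw [if_neg hxa]
    have hne : x.toNat ≠ a.toNat := by omega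
    by_cases hlt : x.toNat < root.length
    · rw [pv_getD_eq_getElem _ _ (by simpa using hlt), pv_getD_eq_getElem _ _ hlt,
        List.getElem_set_ne (by omega)]
    · rw [List.getD_eq_default _ _ (by rw [List.length_set]; omega),
        List.getD_eq_default _ _ (by omega)]

lemma pvPf_map (comp : List Int) (f : Int → Int) (x : Int) (h0 : 0 ≤ x)
    (h : x < comp.length) :
    pvPf (comp.map f) x = f (pvPf comp x) := by
  unfold pvPf
  have hx : x.toNat < comp.length := by omega
  rw [pv_getD_eq_getElem _ _ (by simpa using hx), pv_getD_eq_getElem _ _ hx,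
    List.getElem_map]

-- ---- iterating the parent map ----------------------------------------------

lemma pvIter_range (root : List Int) (hWF : pvWF root) (x : Int) (h0 : 0 ≤ x)
    (h : x < root.length) (k : Nat) :
    0 ≤ (pvPf root)^[k] x ∧ (pvPf root)^[k] x < root.length := by
  induction k with
  | zero => simpa using ⟨h0, h⟩
  | succ k ih => rw [Function.iterate_succ_apply']; exact hWF.1 _ ih.1 ih.2

lemma pv_d_iter (root : List Int) (d : Int → Nat)
    (hrg : ∀ x : Int, 0 ≤ x → x < root.length → 0 ≤ pvPf root x ∧ pvPf root x < root.length)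
    (hd : ∀ x : Int, 0 ≤ x → x < root.length → pvPf root x = x ∨ d (pvPf root x) < d x)
    (x : Int) (h0 : 0 ≤ x) (h : x < root.length) (k : Nat) :
    (pvPf root)^[k] x = x ∨ d ((pvPf root)^[k] x) < d x := by
  induction k with
  | zero => left; rfl
  | succ k ih =>
    have hWF : pvWF root := ⟨hrg, d, hd⟩
    have hr := pvIter_range root hWF x h0 h k
    rw [Function.iterate_succ_apply']
    rcases ih with h1 | h1
    · rw [h1]; exact hd x h0 h
    · rcases hd _ hr.1 hr.2 with h2 | h2
      · rw [h2]; right; exact h1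
      · right; omega

lemma pvStab (root : List Int) (x : Int) (k : Nat)
    (hk : pvPf root ((pvPf root)^[k] x) = (pvPf root)^[k] x) :
    ∀ m, k ≤ m → (pvPf root)^[m] x = (pvPf root)^[k] x := by
  intro m hm
  induction m with
  | zero => have : k = 0 := by omega
            subst this; rfl
  | succ m ih =>
    rcases Nat.lt_or_ge m k with h' | h'
    · have : k = m + 1 := by omega
      subst this; rfl
    · rw [Function.iterate_succ_apply', ih h', hk]

lemma pvReach (root : List Int) (hWF : pvWF root) (x : Int) (h0 : 0 ≤ x)
    (h : x < root.length) :
    ∃ k, k < root.length ∧ pvPf root ((pvPf root)^[k] x) = (pvPf root)^[k] x := by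
  by_contra hcon
  push_neg at hcon
  obtain ⟨d, hd⟩ := hWF.2
  have hstep : ∀ k, k < root.length →
      d ((pvPf root)^[k + 1] x) < d ((pvPf root)^[k] x) := by
    intro k hk
    have hr := pvIter_range root hWF x h0 h k
    rw [Function.iterate_succ_apply']
    rcases hd _ hr.1 hr.2 with h1 | h1
    · exact absurd h1 (hcon k hk)
    · exact h1
  have hmono : ∀ k1 k2, k1 < k2 → k2 ≤ root.length →
      d ((pvPf root)^[k2] x) < d ((pvPf root)^[k1] x) := by
    intro k1 k2 hlt hle
    induction k2 with
    | zero => omega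
    | succ k2 ih =>
      rcases Nat.lt_or_ge k1 k2 with h' | h'
      · exact lt_trans (hstep k2 (by omega)) (ih h' (by omega))
      · have : k1 = k2 := by omega
        subst this; exact hstep k1 (by omega)
  have hne : ∀ k1 k2, k1 < k2 → k2 ≤ root.length →
      ((pvPf root)^[k1] x).toNat ≠ ((pvPf root)^[k2] x).toNat := by
    intro k1 k2 hlt hle heq
    have hm := hmono k1 k2 hlt hle
    have hr1 := pvIter_range root hWF x h0 h k1
    have hr2 := pvIter_range root hWF x h0 h k2
    have : (pvPf root)^[k1] x = (pvPf root)^[k2] x := by omega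
    rw [this] at hm; omega
  have hinj : Set.InjOn (fun k => ((pvPf root)^[k] x).toNat)
      ↑(Finset.range (root.length + 1)) := by
    intro a ha b hb hab
    by_contra hne'
    simp [Finset.mem_coe, Finset.mem_range] at ha hb
    rcases Nat.lt_trichotomy a b with h' | h' | h'
    · exact hne a b h' (by omega) hab
    · exact hne' h'
    · exact hne b a h' (by omega) hab.symm
  have hsub : (Finset.range (root.length + 1)).image (fun k => ((pvPf root)^[k] x).toNat)
      ⊆ Finset.range root.length := by
    intro y hy
    simp only [Finset.mem_image, Finset.mem_range] at hy ⊢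
    obtain ⟨k, hk, rfl⟩ := hy
    have hr := pvIter_range root hWF x h0 h k
    omega
  have hcard := Finset.card_le_card hsub
  rw [Finset.card_image_of_injOn hinj] at hcard
  simp at hcard

lemma pvRootOf_isRoot (root : List Int) (hWF : pvWF root) (x : Int) (h0 : 0 ≤ x)
    (h : x < root.length) : pvPf root (pvRootOf root x) = pvRootOf root x := by
  obtain ⟨k, hk, hroot⟩ := pvReach root hWF x h0 h
  have := pvStab root x k hroot root.length (by omega)
  unfold pvRootOf; rw [this]; exact hroot

lemma pvRootOf_range (root : List Int) (hWF : pvWF root) (x : Int) (h0 : 0 ≤ x)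
    (h : x < root.length) : 0 ≤ pvRootOf root x ∧ pvRootOf root x < root.length :=
  pvIter_range root hWF x h0 h root.length

lemma pvRootOf_fix (root : List Int) (x : Int) (hx : pvPf root x = x) :
    pvRootOf root x = x := by
  have := pvStab root x 0 (by simpa using hx) root.length (by omega)
  simpa [pvRootOf] using this

lemma pvRootOf_pf (root : List Int) (hWF : pvWF root) (x : Int) (h0 : 0 ≤ x)
    (h : x < root.length) : pvRootOf root (pvPf root x) = pvRootOf root x := by
  have h1 : (pvPf root)^[root.length] (pvPf root x)
      = (pvPf root)^[root.length + 1] x := (Function.iterate_succ_apply _ _ _).symm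
  have h2 := pvRootOf_isRoot root hWF x h0 h
  unfold pvRootOf at h2 ⊢
  rw [h1, Function.iterate_succ_apply', h2]

lemma pvRootOf_self_pf (root : List Int) (hWF : pvWF root) (x : Int) (h0 : 0 ≤ x)
    (h : x < root.length) (hfix : pvRootOf root x = x) : pvPf root x = x := by
  by_contra hne
  obtain ⟨d, hd⟩ := hWF.2
  have hdx : d (pvPf root x) < d x := by
    rcases hd x h0 h with h1 | h1
    · exact absurd h1 hne
    · exact h1
  have hrg := hWF.1 x h0 h
  have hiter := pv_d_iter root d hWF.1 hd (pvPf root x) hrg.1 hrg.2 root.length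
  have hpf : pvRootOf root (pvPf root x) = pvRootOf root x := pvRootOf_pf root hWF x h0 h
  unfold pvRootOf at hpf
  rcases hiter with h1 | h1
  · rw [h1] at hpf
    unfold pvRootOf at hfix
    rw [hfix] at hpf
    exact hne hpf
  · rw [hpf] at h1
    unfold pvRootOf at hfix
    rw [hfix] at h1
    omega

-- ---- the one update lemma: set a parent pointer to a root -------------------

lemma pvSetParent (root : List Int) (x r : Int) (hWF : pvWF root)
    (hx0 : 0 ≤ x) (hx : x < root.length) (hr0 : 0 ≤ r) (hr : r < root.length)
    (hrfix : pvPf root r = r)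
    (hcase : r = pvRootOf root x ∨ pvPf root x = x) :
    pvWF (root.set x.toNat r) ∧
    (∀ y : Int, 0 ≤ y → y < root.length →
      pvRootOf (root.set x.toNat r) y =
        if pvRootOf root y = pvRootOf root x then r else pvRootOf root y) := by
  set root2 := root.set x.toNat r with hroot2
  have hlen2 : root2.length = root.length := by rw [hroot2, List.length_set]
  have pf2 : ∀ y : Int, 0 ≤ y → pvPf root2 y = if y = x then r else pvPf root y :=
    fun y hy0 => pvPf_set root x r y hx0 hx hy0
  obtain ⟨d, hd⟩ := hWF.2
  have hWF2 : pvWF root2 := by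
    constructor
    · intro y h0 hy
      rw [hlen2] at hy ⊢
      rw [pf2 y h0]
      split
      · exact ⟨hr0, hr⟩
      · exact hWF.1 y h0 hy
    · refine ⟨fun z => d z + (if pvRootOf root z = pvRootOf root x then d r + 1 else 0), ?_⟩
      intro y h0 hy
      rw [hlen2] at hy
      rw [pf2 y h0]
      by_cases hyx : y = x
      · subst hyx
        simp only [if_pos rfl]
        by_cases hrx : r = y
        · left; exact hrx
        · right
          have hrr : pvRootOf root r = r := pvRootOf_fix root r hrfix
          rcases hcase with hcr | hpx
          · have hclsr : pvRootOf root r = pvRootOf root y := by rw [hrr, hcr]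
            have hkey : d r < d y := by
              have hit := pv_d_iter root d hWF.1 hd y h0 hy root.length
              have hru : (pvPf root)^[root.length] y = pvRootOf root y := rfl
              rw [hru, ← hcr] at hit
              rcases hit with h1 | h1
              · exact absurd h1 hrx
              · exact h1
            split_ifs <;> omega
          · have hry : pvRootOf root y = y := pvRootOf_fix root y hpx
            have hcond : ¬ (pvRootOf root r = pvRootOf root y) := by
              rw [hrr, hry]; exact hrx
            split_ifs <;> omega
      · simp only [if_neg hyx]
        rcases hd y h0 hy with h1 | h1
        · left; exact h1
        · right
          have hcls : pvRootOf root (pvPf root y) = pvRootOf root y :=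
            pvRootOf_pf root hWF y h0 hy
          split_ifs <;> omega
  refine ⟨hWF2, ?_⟩
  suffices H : ∀ m, ∀ y : Int, 0 ≤ y → y < root.length → d y < m →
      pvRootOf root2 y =
        (if pvRootOf root y = pvRootOf root x then r else pvRootOf root y) by
    intro y h0 hy
    exact H (d y + 1) y h0 hy (Nat.lt_succ_self _)
  intro m
  induction m with
  | zero => intro y _ _ h; omega
  | succ m ih =>
    intro y h0 hy _hdm
    by_cases hyx : y = x
    · subst hyx
      have hpf2 : pvPf root2 y = r := by rw [pf2 y h0]; simp
      by_cases hrx : r = y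
      · have hfix2 : pvRootOf root2 y = y := pvRootOf_fix root2 y (by rw [hpf2, hrx])
        rw [hfix2, if_pos rfl]
        exact hrx.symm
      · have h1 : pvRootOf root2 y = pvRootOf root2 r := by
          rw [← hpf2]
          exact (pvRootOf_pf root2 hWF2 y h0 (by rw [hlen2]; exact hy)).symm
        have h2 : pvPf root2 r = r := by rw [pf2 r hr0, if_neg hrx]; exact hrfix
        rw [h1, pvRootOf_fix root2 r h2, if_pos rfl]
    · have hpf2 : pvPf root2 y = pvPf root y := by rw [pf2 y h0, if_neg hyx]
      by_cases hfy : pvPf root y = y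
      · have hr2 : pvRootOf root2 y = y := pvRootOf_fix root2 y (hpf2.trans hfy)
        have hr1 : pvRootOf root y = y := pvRootOf_fix root y hfy
        rw [hr2, hr1]
        by_cases hcy : y = pvRootOf root x
        · rcases hcase with hcr | hpx
          · rw [if_pos hcy, hcr, ← hcy]
          · have hxx := pvRootOf_fix root x hpx
            rw [hxx] at hcy
            exact absurd hcy hyx
        · rw [if_neg hcy]
      · have hd' : d (pvPf root y) < d y := by
          rcases hd y h0 hy with h1 | h1
          · exact absurd h1 hfy
          · exact h1
        have hrg := hWF.1 y h0 hy
        have e1 : pvRootOf root2 y = pvRootOf root2 (pvPf root y) := by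
          rw [← hpf2]
          exact (pvRootOf_pf root2 hWF2 y h0 (by rw [hlen2]; exact hy)).symm
        have e2 : pvRootOf root y = pvRootOf root (pvPf root y) :=
          (pvRootOf_pf root hWF y h0 hy).symm
        rw [e1, ih (pvPf root y) hrg.1 hrg.2 (by omega), ← e2]

-- ---- find ------------------------------------------------------------------

lemma pvFind_spec (fuel : Nat) : ∀ (root : List Int) (x : Int), pvWF root → 0 ≤ x →
    x < root.length →
    (∃ k, k ≤ fuel ∧ pvPf root ((pvPf root)^[k] x) = (pvPf root)^[k] x) →
    (pvFind root x fuel).2 = pvRootOf root x ∧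
    (pvFind root x fuel).1.length = root.length ∧
    pvWF (pvFind root x fuel).1 ∧
    (∀ y : Int, 0 ≤ y → y < root.length →
      pvRootOf (pvFind root x fuel).1 y = pvRootOf root y) := by
  induction fuel with
  | zero =>
    intro root x hWF h0 h hk
    obtain ⟨k, hk0, hfix⟩ := hk
    have hkz : k = 0 := by omega
    subst hkz
    simp only [Function.iterate_zero, id] at hfix
    exact ⟨(pvRootOf_fix root x hfix).symm, rfl, hWF, fun y _ _ => rfl⟩
  | succ fuel ih =>
    intro root x hWF h0 h hk
    have hget := pyGet?_pvPf root x h0 h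
    by_cases hfx : x = pvPf root x
    · have hunf : pvFind root x (fuel + 1) = (root, x) := by
        simp only [pvFind, hget]; rw [if_pos hfx]
      rw [hunf]
      exact ⟨(pvRootOf_fix root x hfx.symm).symm, rfl, hWF, fun y _ _ => rfl⟩
    · obtain ⟨k, hk0, hfix⟩ := hk
      have hkpos : k ≠ 0 := by
        rintro rfl
        simp only [Function.iterate_zero, id] at hfix
        exact hfx hfix.symm
      obtain ⟨k', rfl⟩ := Nat.exists_eq_succ_of_ne_zero hkpos
      rw [Function.iterate_succ_apply] at hfix
      have hrg := hWF.1 x h0 h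
      have hrec := ih root (pvPf root x) hWF hrg.1 hrg.2 ⟨k', by omega, hfix⟩
      have hunf : pvFind root x (fuel + 1) =
          (PySem.List.pySetD (pvFind root (pvPf root x) fuel).1 x
            (pvFind root (pvPf root x) fuel).2,
           (pvFind root (pvPf root x) fuel).2) := by
        simp only [pvFind, hget]; rw [if_neg hfx]
      set p := pvFind root (pvPf root x) fuel with hp
      obtain ⟨hp2, hplen, hpWF, hppres⟩ := hrec
      have hpfx : pvRootOf root (pvPf root x) = pvRootOf root x :=
        pvRootOf_pf root hWF x h0 h
      have hr : p.2 = pvRootOf root x := by rw [hp2, hpfx]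
      have hrofr := pvRootOf_range root hWF x h0 h
      have hrfix0 : pvPf root (pvRootOf root x) = pvRootOf root x :=
        pvRootOf_isRoot root hWF x h0 h
      have hrfix1 : pvPf p.1 (pvRootOf root x) = pvRootOf root x := by
        apply pvRootOf_self_pf p.1 hpWF _ hrofr.1 (by rw [hplen]; exact hrofr.2)
        rw [hppres _ hrofr.1 hrofr.2]
        exact pvRootOf_fix root _ hrfix0
      have hsetD : PySem.List.pySetD p.1 x p.2 = p.1.set x.toNat (pvRootOf root x) := by
        rw [hr]; exact PySem.List.pySetD_of_nonneg p.1 _ h0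
      have hsp := pvSetParent p.1 x (pvRootOf root x) hpWF h0 (by rw [hplen]; exact h)
          hrofr.1 (by rw [hplen]; exact hrofr.2) hrfix1
          (Or.inl (by rw [hppres x h0 h]))
      rw [hunf]
      refine ⟨hr, ?_, ?_, ?_⟩
      · simp only [hsetD, List.length_set, hplen]
      · rw [hsetD]; exact hsp.1
      · intro y hy0 hy
        rw [hsetD]
        rw [hsp.2 y hy0 (by rw [hplen]; exact hy)]
        rw [hppres y hy0 hy, hppres x h0 h]
        by_cases hc : pvRootOf root y = pvRootOf root x
        · rw [if_pos hc, hc]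
        · rw [if_neg hc]

lemma pvFind_run (root : List Int) (x : Int) (hWF : pvWF root)
    (h : PySem.Raise.InRange root.length x) :
    (pvFind root x root.length).2 = pvRootOf root (pvNrm root.length x) ∧
    (pvFind root x root.length).1.length = root.length ∧
    pvWF (pvFind root x root.length).1 ∧
    (∀ y : Int, 0 ≤ y → y < root.length →
      pvRootOf (pvFind root x root.length).1 y = pvRootOf root y) := by
  have hnr := pvNrm_range root.length x h
  by_cases hneg : x < 0
  · -- negative index: one unfolding step lands on the wrapped entry
    have hL : root.length ≠ 0 := by
      obtain ⟨h1, h2⟩ := h; intro hz; rw [hz] at h1 h2; omega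
    obtain ⟨m, hm⟩ := Nat.exists_eq_succ_of_ne_zero hL
    have hget := pyGet?_nrm root x h
    have hv := hWF.1 (pvNrm root.length x) hnr.1 hnr.2
    have hfx : x ≠ pvPf root (pvNrm root.length x) := by omega
    have hunf : pvFind root x (m + 1) =
        (PySem.List.pySetD (pvFind root (pvPf root (pvNrm root.length x)) m).1 x
          (pvFind root (pvPf root (pvNrm root.length x)) m).2,
         (pvFind root (pvPf root (pvNrm root.length x)) m).2) := by
      simp only [pvFind, hget]; rw [if_neg hfx]
    obtain ⟨k, hk, hkfix⟩ := pvReach root hWF (pvPf root (pvNrm root.length x)) hv.1 hv.2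
    have hrec := pvFind_spec m root (pvPf root (pvNrm root.length x)) hWF hv.1 hv.2
      ⟨k, by omega, hkfix⟩
    set p := pvFind root (pvPf root (pvNrm root.length x)) m with hp
    obtain ⟨hp2, hplen, hpWF, hppres⟩ := hrec
    have hpfx : pvRootOf root (pvPf root (pvNrm root.length x))
        = pvRootOf root (pvNrm root.length x) :=
      pvRootOf_pf root hWF (pvNrm root.length x) hnr.1 hnr.2
    have hr : p.2 = pvRootOf root (pvNrm root.length x) := by rw [hp2, hpfx]
    have hrofr := pvRootOf_range root hWF (pvNrm root.length x) hnr.1 hnr.2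
    have hrfix0 := pvRootOf_isRoot root hWF (pvNrm root.length x) hnr.1 hnr.2
    have hrfix1 : pvPf p.1 (pvRootOf root (pvNrm root.length x))
        = pvRootOf root (pvNrm root.length x) := by
      apply pvRootOf_self_pf p.1 hpWF _ hrofr.1 (by rw [hplen]; exact hrofr.2)
      rw [hppres _ hrofr.1 hrofr.2]
      exact pvRootOf_fix root _ hrfix0
    have hsetD : PySem.List.pySetD p.1 x p.2
        = p.1.set (pvNrm root.length x).toNat (pvRootOf root (pvNrm root.length x)) := by
      rw [hr, pySetD_nrm p.1 x _ (by rw [hplen]; exact h), hplen]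
    have hsp := pvSetParent p.1 (pvNrm root.length x)
        (pvRootOf root (pvNrm root.length x)) hpWF hnr.1 (by rw [hplen]; exact hnr.2)
        hrofr.1 (by rw [hplen]; exact hrofr.2) hrfix1
        (Or.inl (by rw [hppres _ hnr.1 hnr.2]))
    have hunf' : pvFind root x root.length =
        (PySem.List.pySetD p.1 x p.2, p.2) := by rw [hm]; exact hunf
    rw [hunf']
    refine ⟨hr, ?_, ?_, ?_⟩
    · simp only [hsetD, List.length_set, hplen]
    · rw [hsetD]; exact hsp.1
    · intro y hy0 hy
      rw [hsetD, hsp.2 y hy0 (by rw [hplen]; exact hy),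
        hppres y hy0 hy, hppres _ hnr.1 hnr.2]
      by_cases hc : pvRootOf root y = pvRootOf root (pvNrm root.length x)
      · rw [if_pos hc, hc]
      · rw [if_neg hc]
  · have hx0 : 0 ≤ x := by omega
    have hnx : pvNrm root.length x = x := by unfold pvNrm; rw [if_neg hneg]
    obtain ⟨k, hk, hkfix⟩ := pvReach root hWF x hx0 h.2
    rw [hnx]
    exact pvFind_spec root.length root x hWF hx0 h.2 ⟨k, by omega, hkfix⟩

-- ---- the simulation invariant between A's state and B's state ---------------

def pvSim (N : Nat) (root rank comp : List Int) : Prop :=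
  root.length = N ∧ rank.length = N ∧ comp.length = N ∧ pvWF root ∧
  ∀ i j : Int, 0 ≤ i → i < N → 0 ≤ j → j < N →
    (pvRootOf root i = pvRootOf root j ↔ pvPf comp i = pvPf comp j)

lemma pvCollapse_aux (p q a b : Int) :
    ((if a = q then p else a) = (if b = q then p else b)) ↔
      (a = b ∨ ((a = p ∨ a = q) ∧ (b = p ∨ b = q))) := by
  by_cases h1 : a = q <;> by_cases h2 : b = q <;> simp [h1, h2] <;> omega

set_option maxHeartbeats 1600000 in
lemma pvMerge_sim (N : Nat) (rt rank2 comp : List Int) (a b cu cv : Int)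
    (hlr : rt.length = N) (hlk : rank2.length = N) (hlc : comp.length = N)
    (hWF : pvWF rt)
    (hiff : ∀ i j : Int, 0 ≤ i → i < N → 0 ≤ j → j < N →
      (pvRootOf rt i = pvRootOf rt j ↔ pvPf comp i = pvPf comp j))
    (ha0 : 0 ≤ a) (ha : a < N) (hb0 : 0 ≤ b) (hb : b < N)
    (hra : pvRootOf rt a = a) (hrb : pvRootOf rt b = b)
    (hmm : ∀ i : Int, 0 ≤ i → i < N →
      ((pvRootOf rt i = b ∨ pvRootOf rt i = a) ↔ (pvPf comp i = cu ∨ pvPf comp i = cv))) :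
    pvSim N (PySem.List.pySetD rt a b) rank2 (comp.map (fun c => if c = cv then cu else c)) := by
  have ha' : a < rt.length := by rw [hlr]; exact ha
  have hb' : b < rt.length := by rw [hlr]; exact hb
  have hfa : pvPf rt a = a := pvRootOf_self_pf rt hWF a ha0 ha' hra
  have hfb : pvPf rt b = b := pvRootOf_self_pf rt hWF b hb0 hb' hrb
  have hset : PySem.List.pySetD rt a b = rt.set a.toNat b :=
    PySem.List.pySetD_of_nonneg rt b ha0
  have hsp := pvSetParent rt a b hWF ha0 ha' hb0 hb' hfb (Or.inr hfa)
  rw [hset]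
  refine ⟨by rw [List.length_set]; exact hlr, hlk, by rw [List.length_map]; exact hlc,
    hsp.1, ?_⟩
  intro i j hi0 hi hj0 hj
  have hi' : i < rt.length := by rw [hlr]; exact hi
  have hj' : j < rt.length := by rw [hlr]; exact hj
  have hic : i < comp.length := by rw [hlc]; exact hi
  have hjc : j < comp.length := by rw [hlc]; exact hj
  rw [hsp.2 i hi0 hi', hsp.2 j hj0 hj', hra,
    pvPf_map comp _ i hi0 hic, pvPf_map comp _ j hj0 hjc]
  rw [pvCollapse_aux b a _ _, pvCollapse_aux cu cv _ _]
  have hij := hiff i j hi0 hi hj0 hj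
  have hmi := hmm i hi0 hi
  have hmj := hmm j hj0 hj
  constructor
  · rintro (h | ⟨h1, h2⟩)
    · exact Or.inl (hij.mp h)
    · exact Or.inr ⟨hmi.mp h1, hmj.mp h2⟩
  · rintro (h | ⟨h1, h2⟩)
    · exact Or.inl (hij.mpr h)
    · exact Or.inr ⟨hmi.mpr h1, hmj.mpr h2⟩

set_option maxHeartbeats 1600000 in
lemma pvStep_sim (N : Nat) (root rank comp : List Int) (cnt : Int) (conn : List Int)
    (hsim : pvSim N root rank comp)
    (h0 : PySem.Raise.InRange N (conn.getD 0 0))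
    (h1 : PySem.Raise.InRange N (conn.getD 1 0)) :
    pvSim N (pvStepA (root, rank, cnt) conn).1 (pvStepA (root, rank, cnt) conn).2.1
      (pvStepB (comp, cnt) conn).1 ∧
    (pvStepA (root, rank, cnt) conn).2.2 = (pvStepB (comp, cnt) conn).2 := by
  obtain ⟨hlr, hlk, hlc, hWF, hiff⟩ := hsim
  subst hlr
  have hu0 : PySem.List.pyGetD conn 0 0 = conn.getD 0 0 := PySem.List.pyGetD_ofNat' conn 0 0
  have hv0 : PySem.List.pyGetD conn 1 0 = conn.getD 1 0 := PySem.List.pyGetD_ofNat' conn 1 0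
  have hnur := pvNrm_range root.length (conn.getD 0 0) h0
  have hnvr := pvNrm_range root.length (conn.getD 1 0) h1
  -- labels on B's side
  have hcu : PySem.List.pyGetD comp (conn.getD 0 0) 0
      = pvPf comp (pvNrm root.length (conn.getD 0 0)) := by
    have := pyGetD_nrm comp (conn.getD 0 0) 0 (by rw [hlc]; exact h0)
    rw [hlc] at this; exact this
  have hcv : PySem.List.pyGetD comp (conn.getD 1 0) 0
      = pvPf comp (pvNrm root.length (conn.getD 1 0)) := by
    have := pyGetD_nrm comp (conn.getD 1 0) 0 (by rw [hlc]; exact h1)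
    rw [hlc] at this; exact this
  simp only [pvStepA, pvStepB, hu0, hv0, hcu, hcv]
  -- the four find calls of A
  obtain ⟨e1, l1, w1, pr1⟩ := pvFind_run root (conn.getD 0 0) hWF h0
  set p1 := pvFind root (conn.getD 0 0) root.length with hp1d
  obtain ⟨e2, l2, w2, pr2⟩ := pvFind_run p1.1 (conn.getD 1 0) w1 (by rw [l1]; exact h1)
  set p2 := pvFind p1.1 (conn.getD 1 0) p1.1.length with hp2d
  have prA : ∀ z : Int, 0 ≤ z → z < root.length → pvRootOf p2.1 z = pvRootOf root z := by
    intro z hz0 hz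
    rw [pr2 z hz0 (by rw [l1]; exact hz), pr1 z hz0 hz]
  have e1' : p1.2 = pvRootOf root (pvNrm root.length (conn.getD 0 0)) := e1
  have e2' : p2.2 = pvRootOf root (pvNrm root.length (conn.getD 1 0)) := by
    rw [e2, l1]
    exact pr1 _ hnvr.1 hnvr.2
  have hcond : p1.2 = p2.2 ↔
      pvPf comp (pvNrm root.length (conn.getD 0 0))
        = pvPf comp (pvNrm root.length (conn.getD 1 0)) := by
    rw [e1', e2']
    exact hiff _ _ hnur.1 hnur.2 hnvr.1 hnvr.2
  by_cases hc : pvPf comp (pvNrm root.length (conn.getD 0 0))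
      = pvPf comp (pvNrm root.length (conn.getD 1 0))
  · rw [if_pos (hcond.mpr hc), if_pos hc]
    refine ⟨⟨by rw [l2, l1], hlk, hlc, w2, ?_⟩, rfl⟩
    intro i j hi0 hi hj0 hj
    rw [prA i hi0 hi, prA j hj0 hj]
    exact hiff i j hi0 hi hj0 hj
  · rw [if_neg (fun h => hc (hcond.mp h)), if_neg hc]
    obtain ⟨e3, l3, w3, pr3⟩ := pvFind_run p2.1 (conn.getD 0 0) w2 (by rw [l2, l1]; exact h0)
    set p3 := pvFind p2.1 (conn.getD 0 0) p2.1.length with hp3d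
    obtain ⟨e4, l4, w4, pr4⟩ := pvFind_run p3.1 (conn.getD 1 0) w3
      (by rw [l3, l2, l1]; exact h1)
    set p4 := pvFind p3.1 (conn.getD 1 0) p3.1.length with hp4d
    have prB : ∀ z : Int, 0 ≤ z → z < root.length → pvRootOf p3.1 z = pvRootOf root z := by
      intro z hz0 hz
      rw [pr3 z hz0 (by rw [l2, l1]; exact hz), prA z hz0 hz]
    have prC : ∀ z : Int, 0 ≤ z → z < root.length → pvRootOf p4.1 z = pvRootOf root z := by
      intro z hz0 hz
      rw [pr4 z hz0 (by rw [l3, l2, l1]; exact hz), prB z hz0 hz]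
    have ex3 : p3.2 = pvRootOf root (pvNrm root.length (conn.getD 0 0)) := by
      rw [e3, l2, l1]
      exact prA _ hnur.1 hnur.2
    have ex4 : p4.2 = pvRootOf root (pvNrm root.length (conn.getD 1 0)) := by
      rw [e4, l3, l2, l1]
      exact prB _ hnvr.1 hnvr.2
    have hrur := pvRootOf_range root hWF _ hnur.1 hnur.2
    have hrvr := pvRootOf_range root hWF _ hnvr.1 hnvr.2
    have hne : pvRootOf root (pvNrm root.length (conn.getD 1 0))
        ≠ pvRootOf root (pvNrm root.length (conn.getD 0 0)) := by
      intro h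
      exact hc (hcond.mp (by rw [e1', e2', h]))
    have hl4 : p4.1.length = root.length := by rw [l4, l3, l2, l1]
    have hiff4 : ∀ i j : Int, 0 ≤ i → i < root.length → 0 ≤ j → j < root.length →
        (pvRootOf p4.1 i = pvRootOf p4.1 j ↔ pvPf comp i = pvPf comp j) := by
      intro i j hi0 hi hj0 hj
      rw [prC i hi0 hi, prC j hj0 hj]
      exact hiff i j hi0 hi hj0 hj
    have hfixu : pvRootOf root (pvRootOf root (pvNrm root.length (conn.getD 0 0)))
        = pvRootOf root (pvNrm root.length (conn.getD 0 0)) :=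
      pvRootOf_fix root _ (pvRootOf_isRoot root hWF _ hnur.1 hnur.2)
    have hfixv : pvRootOf root (pvRootOf root (pvNrm root.length (conn.getD 1 0)))
        = pvRootOf root (pvNrm root.length (conn.getD 1 0)) :=
      pvRootOf_fix root _ (pvRootOf_isRoot root hWF _ hnvr.1 hnvr.2)
    have hfix4u : pvRootOf p4.1 (pvRootOf root (pvNrm root.length (conn.getD 0 0)))
        = pvRootOf root (pvNrm root.length (conn.getD 0 0)) := by
      rw [prC _ hrur.1 hrur.2]; exact hfixu
    have hfix4v : pvRootOf p4.1 (pvRootOf root (pvNrm root.length (conn.getD 1 0)))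
        = pvRootOf root (pvNrm root.length (conn.getD 1 0)) := by
      rw [prC _ hrvr.1 hrvr.2]; exact hfixv
    have hmmuv : ∀ i : Int, 0 ≤ i → i < root.length →
        ((pvRootOf p4.1 i = pvRootOf root (pvNrm root.length (conn.getD 0 0))
          ∨ pvRootOf p4.1 i = pvRootOf root (pvNrm root.length (conn.getD 1 0)))
        ↔ (pvPf comp i = pvPf comp (pvNrm root.length (conn.getD 0 0))
          ∨ pvPf comp i = pvPf comp (pvNrm root.length (conn.getD 1 0)))) := by
      intro i hi0 hi
      have hiu := hiff i _ hi0 hi hnur.1 hnur.2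
      have hiv := hiff i _ hi0 hi hnvr.1 hnvr.2
      rw [prC i hi0 hi]
      constructor
      · rintro (h | h)
        · exact Or.inl (hiu.mp h)
        · exact Or.inr (hiv.mp h)
      · rintro (h | h)
        · exact Or.inl (hiu.mpr h)
        · exact Or.inr (hiv.mpr h)
    rw [if_pos (by rw [ex3, ex4]; exact hne)]
    split_ifs with hk1 hk2
    · refine ⟨?_, rfl⟩
      rw [ex3, ex4]
      exact pvMerge_sim root.length p4.1 rank comp _ _ _ _ hl4 hlk hlc w4 hiff4
        hrvr.1 hrvr.2 hrur.1 hrur.2 hfix4v hfix4u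
        (fun i hi0 hi => hmmuv i hi0 hi)
    · refine ⟨?_, rfl⟩
      rw [ex3, ex4]
      refine pvMerge_sim root.length p4.1 rank comp _ _ _ _ hl4 hlk hlc w4 hiff4
        hrur.1 hrur.2 hrvr.1 hrvr.2 hfix4u hfix4v ?_
      intro i hi0 hi
      have h2 := hmmuv i hi0 hi
      constructor
      · rintro (h | h)
        · exact h2.mp (Or.inr h)
        · exact h2.mp (Or.inl h)
      · intro h
        rcases h2.mpr h with h3 | h3
        · exact Or.inr h3
        · exact Or.inl h3
    · refine ⟨?_, rfl⟩
      rw [ex3, ex4]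
      exact pvMerge_sim root.length p4.1 (PySem.List.pySetD rank
          (pvRootOf root (pvNrm root.length (conn.getD 0 0)))
          (PySem.List.pyGetD rank (pvRootOf root (pvNrm root.length (conn.getD 0 0))) 0 + 1))
          comp _ _ _ _ hl4
        (by rw [PySem.List.length_pySetD]; exact hlk) hlc w4 hiff4
        hrvr.1 hrvr.2 hrur.1 hrur.2 hfix4v hfix4u
        (fun i hi0 hi => hmmuv i hi0 hi)

lemma pvFold (N : Nat) (conns : List (List Int)) : ∀ (root rank comp : List Int) (cnt : Int),
    pvSim N root rank comp →
    (∀ c ∈ conns, PySem.Raise.InRange N (c.getD 0 0) ∧ PySem.Raise.InRange N (c.getD 1 0)) →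
    (conns.foldl pvStepA (root, rank, cnt)).2.2 = (conns.foldl pvStepB (comp, cnt)).2 := by
  induction conns with
  | nil => intro root rank comp cnt _ _; rfl
  | cons c cs ih =>
    intro root rank comp cnt hsim hc
    have hstep := pvStep_sim N root rank comp cnt c hsim (hc c (by simp)).1 (hc c (by simp)).2
    simp only [List.foldl_cons]
    rcases hA : pvStepA (root, rank, cnt) c with ⟨r', k', cA⟩
    rcases hB : pvStepB (comp, cnt) c with ⟨cmp', cB⟩
    rw [hA, hB] at hstep
    obtain rfl : cA = cB := hstep.2
    exact ih r' k' cmp' cA hstep.1 (fun d hd => hc d (by simp [hd]))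

lemma pvPf_init (N : Nat) (x : Int) (h0 : 0 ≤ x) (h : x < N) :
    pvPf ((List.range N).map (fun (i : Nat) => (i : Int))) x = x := by
  unfold pvPf
  rw [PySem.List.getD_map_range _ _ _ _ (by omega)]
  omega

lemma pvSim_init (N : Nat) :
    pvSim N ((List.range N).map (fun (i : Nat) => (i : Int))) (List.replicate N (1 : Int))
      ((List.range N).map (fun (i : Nat) => (i : Int))) := by
  have hlen : ((List.range N).map (fun (i : Nat) => (i : Int))).length = N := by simp
  have hpf : ∀ x : Int, 0 ≤ x → x < N →
      pvPf ((List.range N).map (fun (i : Nat) => (i : Int))) x = x := fun x h0 h =>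
    pvPf_init N x h0 h
  have hWF : pvWF ((List.range N).map (fun (i : Nat) => (i : Int))) := by
    refine ⟨?_, fun _ => 0, ?_⟩
    · intro x h0 h
      rw [hlen] at h ⊢
      rw [hpf x h0 h]; exact ⟨h0, h⟩
    · intro x h0 h
      rw [hlen] at h
      left; exact hpf x h0 h
  refine ⟨hlen, by simp, hlen, hWF, ?_⟩
  intro i j hi0 hi hj0 hj
  rw [pvRootOf_fix _ i (hpf i hi0 (by omega)), pvRootOf_fix _ j (hpf j hj0 (by omega)),
    hpf i hi0 (by omega), hpf j hj0 (by omega)]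


-- ===== VERDICT (by name: the statement is the Claim_ definition above) =====
theorem makeConnected_spec : Claim_equal_makeConnected := by
  intro n connections _hDom hPre
  unfold Spec_makeConnected makeConnected makeConnected_alt
  by_cases hg : (connections.length : Int) < n - 1
  · rw [if_pos hg, if_pos hg]
  · rw [if_neg hg, if_neg hg]
    have hP : ∀ c ∈ connections, 2 ≤ c.length ∧
        PySem.Raise.InRange n.toNat (c.getD 0 0) ∧
        PySem.Raise.InRange n.toNat (c.getD 1 0) := by
      rcases hPre with h | h
      · exact absurd h hg
      · exact h
    have hfold := pvFold n.toNat connections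
      ((List.range n.toNat).map (fun (i : Nat) => (i : Int)))
      (List.replicate n.toNat (1 : Int))
      ((List.range n.toNat).map (fun (i : Nat) => (i : Int))) n
      (pvSim_init n.toNat)
      (fun c hc => ⟨(hP c hc).2.1, (hP c hc).2.2⟩)
    exact congrArg (fun z => z - 1) hfold
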